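-- pv_equiv track=rewrite | github.com/Unique-AG/ai | unique_toolkit/unique_toolkit/agentic/history_manager/history_construction_with_contents.py | _segment_gpt_request_into_turns
-- ===== SOURCE A (Python) =====
-- def _segment_gpt_request_into_turns(
--     gpt_request: list[dict],
-- ) -> list[list[dict]]:
--     """Segment a gpt_request message array into per-turn groups.
--
--     Each turn starts with a user message. System messages are skipped.
--     Returns a list of turn segments, where each segment is a list of
--     message dicts belonging to that turn.
--     """
--     turns: list[list[dict]] = []
--     current_turn: list[dict] = []
--
--     for msg in gpt_request:
--         if msg.get("role") == "system":
--             continue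
--         if msg.get("role") == "user" and current_turn:
--             turns.append(current_turn)
--             current_turn = []
--         current_turn.append(msg)
--
--     if current_turn:
--         turns.append(current_turn)
--
--     return turns
-- ===== SOURCE B (Python) =====
-- def _segment_gpt_request_into_turns(
--     gpt_request: list[dict],
-- ) -> list[list[dict]]:
--     """Two-stage: drop system messages, then recursively split off one turn
--     (the head message plus the following non-user messages) at a time."""
--     filtered = [m for m in gpt_request if m.get("role") != "system"]
--     return _split_turns(filtered)
--
--
-- def _split_turns(msgs: list[dict]) -> list[list[dict]]:
--     if not msgs:
--         return []
--     i = 1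
--     while i < len(msgs) and msgs[i].get("role") != "user":
--         i += 1
--     return [msgs[:i]] + _split_turns(msgs[i:])
-- ===== Notes on version B (the rewrite author's own statement) =====
-- stated objective: alternative
-- what changed: B first filters out system messages, then recursively splits the remainder into turns (each turn = head message plus the following non-user messages), replacing A's single accumulate-and-flush loop with a staged filter-then-recursive-partition decomposition.
import Mathlib
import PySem

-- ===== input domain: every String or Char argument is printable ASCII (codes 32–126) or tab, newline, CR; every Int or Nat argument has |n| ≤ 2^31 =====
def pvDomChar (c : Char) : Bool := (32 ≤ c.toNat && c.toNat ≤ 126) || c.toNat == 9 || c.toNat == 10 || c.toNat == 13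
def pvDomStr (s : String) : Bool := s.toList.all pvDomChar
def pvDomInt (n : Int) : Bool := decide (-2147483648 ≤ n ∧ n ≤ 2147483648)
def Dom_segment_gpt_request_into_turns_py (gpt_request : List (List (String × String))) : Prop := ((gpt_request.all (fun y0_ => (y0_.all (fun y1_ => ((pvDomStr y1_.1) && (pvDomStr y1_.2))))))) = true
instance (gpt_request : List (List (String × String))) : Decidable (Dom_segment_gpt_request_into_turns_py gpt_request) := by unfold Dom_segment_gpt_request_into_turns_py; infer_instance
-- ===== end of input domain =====

-- B replaces A's single accumulate-and-flush loop by a staged decomposition: filter out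
-- system messages, then recursively split off one turn at a time; objective: alternative.

-- msg.get("role") : first match in the association list (Python dict lookup)
def pvRole (msg : List (String × String)) : Option String :=
  (msg.find? (fun kv => kv.1 == "role")).map (fun kv => kv.2)

-- ===== PORT A =====
-- A's forward loop: state = (turns, current_turn)
def pvStepA (st : List (List (List (String × String))) × List (List (String × String)))
    (msg : List (String × String)) :
    List (List (List (String × String))) × List (List (String × String)) :=
  if pvRole msg = some "system" then st
  else
    let st' := if pvRole msg = some "user" ∧ st.2 ≠ [] then (st.1 ++ [st.2], []) else st
    (st'.1, st'.2 ++ [msg])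

def segment_gpt_request_into_turns_py (gpt_request : List (List (String × String))) :
    List (List (List (String × String))) :=
  let st := gpt_request.foldl pvStepA ([], [])
  if st.2 ≠ [] then st.1 ++ [st.2] else st.1

-- ===== PORT B =====
-- m.get("role") != "system"  (B's filter predicate)
def pvNonsys (m : List (String × String)) : Bool := !(pvRole m == some "system")
-- msgs[i].get("role") != "user"  (B's while-loop guard)
def pvNotUser (m : List (String × String)) : Bool := !(pvRole m == some "user")

-- B's _split_turns: the while loop scans the non-user block after the head
-- (= takeWhile/dropWhile split at the next user message), then recurses on the rest.
def pvSplitTurns : List (List (String × String)) → List (List (List (String × String)))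
  | [] => []
  | m :: r => (m :: r.takeWhile pvNotUser) :: pvSplitTurns (r.dropWhile pvNotUser)
termination_by l => l.length
decreasing_by
  simp only [List.length_cons]
  have := List.length_dropWhile_le pvNotUser r
  omega

def segment_gpt_request_into_turns_py_alt (gpt_request : List (List (String × String))) :
    List (List (List (String × String))) :=
  pvSplitTurns (gpt_request.filter pvNonsys)

-- ===== PRECONDITION & SPEC =====
def Spec_segment_gpt_request_into_turns_py (gpt_request : List (List (String × String))) (out : List (List (List (String × String)))) : Prop := out = segment_gpt_request_into_turns_py_alt gpt_request
instance (gpt_request : List (List (String × String))) (out : List (List (List (String × String)))) : Decidable (Spec_segment_gpt_request_into_turns_py gpt_request out) := by unfold Spec_segment_gpt_request_into_turns_py; infer_instance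

-- ===== CLAIM (what is proved, stated in full; the proofs are below) =====
def Claim_equal_segment_gpt_request_into_turns_py : Prop := ∀ (gpt_request : List (List (String × String))), Dom_segment_gpt_request_into_turns_py gpt_request → Spec_segment_gpt_request_into_turns_py gpt_request (segment_gpt_request_into_turns_py gpt_request)

-- ===== LEMMAS AND PROOFS =====

-- turns contributed by the user messages of l (each with its following non-user block)
def pvUs : List (List (String × String)) → List (List (List (String × String)))
  | [] => []
  | m :: r => if pvRole m = some "user" then (m :: r.takeWhile pvNotUser) :: pvUs r else pvUs r

-- closed form of A's loop with a non-empty current turn, including the final flush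
def pvH (cur : List (List (String × String))) :
    List (List (String × String)) → List (List (List (String × String)))
  | [] => [cur]
  | m :: r => if pvRole m = some "user" then cur :: pvH [m] r else pvH (cur ++ [m]) r

theorem pvNotUser_true {m : List (String × String)} (h : ¬ pvRole m = some "user") :
    pvNotUser m = true := by simp [pvNotUser, h]

theorem pvNotUser_false {m : List (String × String)} (h : pvRole m = some "user") :
    pvNotUser m = false := by simp [pvNotUser, h]

theorem pvUs_eq_split (l : List (List (String × String))) :
    pvUs l = pvSplitTurns (l.dropWhile pvNotUser) := by
  induction l with
  | nil => simp [pvUs, pvSplitTurns]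
  | cons m r ih =>
    by_cases hu : pvRole m = some "user"
    · rw [List.dropWhile_cons_of_neg (by simp [pvNotUser_false hu]), pvSplitTurns]
      simp [pvUs, hu, ih]
    · rw [List.dropWhile_cons_of_pos (pvNotUser_true hu)]
      simp [pvUs, hu, ih]

theorem pvH_eq (l : List (List (String × String))) (cur : List (List (String × String))) :
    pvH cur l = (cur ++ l.takeWhile pvNotUser) :: pvUs l := by
  induction l generalizing cur with
  | nil => simp [pvH, pvUs]
  | cons m r ih =>
    by_cases hu : pvRole m = some "user"
    · rw [List.takeWhile_cons_of_neg (by simp [pvNotUser_false hu])]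
      simp [pvH, pvUs, hu, ih]
    · rw [List.takeWhile_cons_of_pos (pvNotUser_true hu)]
      simp [pvH, pvUs, hu, ih]

theorem pvFoldlA_filter (l : List (List (String × String)))
    (st : List (List (List (String × String))) × List (List (String × String))) :
    l.foldl pvStepA st = (l.filter pvNonsys).foldl pvStepA st := by
  induction l generalizing st with
  | nil => rfl
  | cons m r ih =>
    by_cases hs : pvRole m = some "system"
    · simp [pvNonsys, hs, pvStepA, ih]
    · simp [pvNonsys, hs, ih]

theorem pvFoldA_inv (l : List (List (String × String))) (hl : ∀ m ∈ l, pvRole m ≠ some "system")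
    (ts : List (List (List (String × String)))) (cur : List (List (String × String)))
    (hc : cur ≠ []) :
    (if (l.foldl pvStepA (ts, cur)).2 ≠ [] then
        (l.foldl pvStepA (ts, cur)).1 ++ [(l.foldl pvStepA (ts, cur)).2]
      else (l.foldl pvStepA (ts, cur)).1) = ts ++ pvH cur l := by
  induction l generalizing ts cur with
  | nil => simp [pvH, hc]
  | cons m r ih =>
    have hm : pvRole m ≠ some "system" := hl m (by simp)
    have hr : ∀ x ∈ r, pvRole x ≠ some "system" := fun x hx => hl x (by simp [hx])
    by_cases hu : pvRole m = some "user"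
    · simp only [List.foldl_cons, pvStepA, hu, hc, ne_eq, not_false_iff, and_true,
        if_pos trivial]
      rw [ih hr _ _ (by simp)]
      simp [pvH, hu]
    · simp only [List.foldl_cons, pvStepA, if_neg hm, hu, false_and, if_false]
      rw [ih hr _ _ (by simp)]
      simp [pvH, hu]

theorem pv_filter_nonsys (gpt_request : List (List (String × String))) :
    ∀ m ∈ gpt_request.filter pvNonsys, pvRole m ≠ some "system" := by
  intro m hm
  have := List.of_mem_filter hm
  simpa [pvNonsys] using this

theorem pv_equal (gpt_request : List (List (String × String))) :
    segment_gpt_request_into_turns_py gpt_request =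
      segment_gpt_request_into_turns_py_alt gpt_request := by
  unfold segment_gpt_request_into_turns_py segment_gpt_request_into_turns_py_alt
  rw [pvFoldlA_filter]
  have hfl := pv_filter_nonsys gpt_request
  generalize hg : gpt_request.filter pvNonsys = f at hfl ⊢
  cases f with
  | nil => simp [pvSplitTurns]
  | cons m r =>
    have hm : pvRole m ≠ some "system" := hfl m (List.mem_cons_self)
    have hr : ∀ x ∈ r, pvRole x ≠ some "system" := fun x hx => hfl x (List.mem_cons_of_mem _ hx)
    simp only [List.foldl_cons, pvStepA, if_neg hm, ne_eq, not_true, and_false, if_false,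
      List.nil_append]
    rw [pvFoldA_inv r hr [] [m] (by simp), pvH_eq, pvSplitTurns, pvUs_eq_split]
    simp

-- ===== VERDICT (by name: the statement is the Claim_ definition above) =====
theorem segment_gpt_request_into_turns_py_spec : Claim_equal_segment_gpt_request_into_turns_py := by
  intro gpt_request _
  unfold Spec_segment_gpt_request_into_turns_py
  exact pv_equal gpt_request
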